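-- pv_equiv track=rewrite | github.com/horseinthesky/PyNEng | 7.Functions/task7.2a.py | generate_trunk_config
-- ===== SOURCE A (Python) =====
-- def generate_trunk_config(trunk):
--     """
--     trunk - словарь trunk-портов для которых необходимо сгенерировать конфигурацию.
--
--     Возвращает список всех команд, которые были сгенерированы на основе шаблона
--     """
--     trunk_template = ['switchport trunk encapsulation dot1q',
--                       'switchport mode trunk',
--                       'switchport trunk native vlan 999',
--                       'switchport trunk allowed vlan']
--
--     trunk_config = {}
--
--     for intf in trunk:
--         trunk_config[intf] = []
--         for command in trunk_template:
--             if command.endswith('allowed vlan'):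
--                 vlans = ','.join(str(vlan) for vlan in trunk[intf])
--                 trunk_config[intf].append(' {} {}'.format(command, vlans))
--             else:
--                 trunk_config[intf].append(' {}'.format(command))
--     return trunk_config
-- ===== SOURCE B (Python) =====
-- def generate_trunk_config(trunk):
--     static = [' switchport trunk encapsulation dot1q',
--               ' switchport mode trunk',
--               ' switchport trunk native vlan 999']
--     return {intf: static + [' switchport trunk allowed vlan ' + ','.join(str(v) for v in vlans)]
--             for intf, vlans in trunk.items()}
-- ===== Notes on version B (the rewrite author's own statement) =====
-- stated objective: simpler
-- what changed: B replaces A's per-interface loop over a 4-line template with an endswith branch by a dict comprehension that concatenates a literal static command list with the single computed allowed-vlan line.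
import Mathlib
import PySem

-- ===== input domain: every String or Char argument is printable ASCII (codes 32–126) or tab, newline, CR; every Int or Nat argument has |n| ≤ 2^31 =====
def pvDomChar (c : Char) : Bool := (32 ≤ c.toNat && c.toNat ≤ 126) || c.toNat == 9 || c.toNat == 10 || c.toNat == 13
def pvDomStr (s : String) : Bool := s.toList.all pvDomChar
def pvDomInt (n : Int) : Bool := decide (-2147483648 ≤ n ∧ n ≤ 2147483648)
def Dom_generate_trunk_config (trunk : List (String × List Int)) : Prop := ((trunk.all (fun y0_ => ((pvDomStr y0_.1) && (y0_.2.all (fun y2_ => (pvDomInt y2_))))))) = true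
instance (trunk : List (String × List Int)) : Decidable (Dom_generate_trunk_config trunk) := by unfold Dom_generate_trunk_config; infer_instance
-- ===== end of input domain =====

-- ===== PORT A =====
-- B is a simpler decomposition: static command lines as literals plus one computed line,
-- replacing A's inner loop over a template with an endswith branch. Return-value equivalence.
def pvTemplate : List String :=
  ["switchport trunk encapsulation dot1q",
   "switchport mode trunk",
   "switchport trunk native vlan 999",
   "switchport trunk allowed vlan"]

def generate_trunk_config (trunk : List (String × List Int)) : List (String × List String) :=
  let d := PySem.Dict.ofList trunk
  let cfg :=
    d.keys.foldl (fun (cfg : PySem.Dict String (List String)) intf =>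
      let cfg := cfg.insert intf []
      pvTemplate.foldl (fun cfg command =>
        if PySem.Str.endswith command "allowed vlan" then
          let vlans := PySem.Str.join "," ((d.getD intf []).map PySem.Int.toStr)
          cfg.insert intf (cfg.getD intf [] ++ [" " ++ command ++ " " ++ vlans])
        else
          cfg.insert intf (cfg.getD intf [] ++ [" " ++ command])) cfg)
      PySem.Dict.empty
  cfg.items

-- ===== PORT B =====
def generate_trunk_config_alt (trunk : List (String × List Int)) : List (String × List String) :=
  (PySem.Dict.ofList trunk).items.map (fun p =>
    (p.1, [" switchport trunk encapsulation dot1q",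
           " switchport mode trunk",
           " switchport trunk native vlan 999"] ++
          [" switchport trunk allowed vlan " ++ PySem.Str.join "," (p.2.map PySem.Int.toStr)]))

-- ===== PRECONDITION & SPEC =====
def Spec_generate_trunk_config (trunk : List (String × List Int)) (out : List (String × List String)) : Prop := out = generate_trunk_config_alt trunk
instance (trunk : List (String × List Int)) (out : List (String × List String)) : Decidable (Spec_generate_trunk_config trunk out) := by unfold Spec_generate_trunk_config; infer_instance

-- ===== CLAIM (what is proved, stated in full; the proofs are below) =====
def Claim_equal_generate_trunk_config : Prop := ∀ (trunk : List (String × List Int)), Dom_generate_trunk_config trunk → Spec_generate_trunk_config trunk (generate_trunk_config trunk)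

-- ===== LEMMAS AND PROOFS =====
-- the full command list A produces for an interface with vlan list vs
def pvLine (vs : List Int) : List String :=
  [" switchport trunk encapsulation dot1q",
   " switchport mode trunk",
   " switchport trunk native vlan 999",
   " switchport trunk allowed vlan " ++ PySem.Str.join "," (vs.map PySem.Int.toStr)]

theorem pvInner (d : PySem.Dict String (List Int)) (intf : String)
    (cfg : PySem.Dict String (List String)) :
    pvTemplate.foldl (fun cfg command =>
        if PySem.Str.endswith command "allowed vlan" then
          let vlans := PySem.Str.join "," ((d.getD intf []).map PySem.Int.toStr)
          cfg.insert intf (cfg.getD intf [] ++ [" " ++ command ++ " " ++ vlans])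
        else
          cfg.insert intf (cfg.getD intf [] ++ [" " ++ command])) (cfg.insert intf [])
      = cfg.insert intf (pvLine (d.getD intf [])) := by
  have h1 : PySem.Str.endswith "switchport trunk encapsulation dot1q" "allowed vlan" = false := by decide
  have h2 : PySem.Str.endswith "switchport mode trunk" "allowed vlan" = false := by decide
  have h3 : PySem.Str.endswith "switchport trunk native vlan 999" "allowed vlan" = false := by decide
  have h4 : PySem.Str.endswith "switchport trunk allowed vlan" "allowed vlan" = true := by decide
  simp only [pvTemplate, List.foldl, h1, h2, h3, h4, reduceIte,
    PySem.Dict.getD_insert_self, PySem.Dict.insert_insert_self, pvLine]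
  simp [PySem.Dict.getD_insert_self, PySem.Dict.insert_insert_self]

theorem generate_trunk_config_spec : Claim_equal_generate_trunk_config := by
  intro trunk _
  unfold Spec_generate_trunk_config generate_trunk_config generate_trunk_config_alt
  set d := PySem.Dict.ofList trunk with hd
  have hnd : d.keys.Nodup := PySem.Dict.nodup_keys_ofList trunk
  have hbody : ∀ (cfg : PySem.Dict String (List String)) (intf : String),
      (fun (cfg : PySem.Dict String (List String)) intf =>
        let cfg := cfg.insert intf []
        pvTemplate.foldl (fun cfg command =>
          if PySem.Str.endswith command "allowed vlan" then
            let vlans := PySem.Str.join "," ((d.getD intf []).map PySem.Int.toStr)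
            cfg.insert intf (cfg.getD intf [] ++ [" " ++ command ++ " " ++ vlans])
          else
            cfg.insert intf (cfg.getD intf [] ++ [" " ++ command])) cfg) cfg intf
        = cfg.insert intf (pvLine (d.getD intf [])) := fun cfg intf => pvInner d intf cfg
  simp only [hbody]
  have hfresh := PySem.Dict.items_foldl_insert_fresh (k := fun a => a)
    (v := fun a => pvLine (d.getD a [])) (l := d.keys) (d := PySem.Dict.empty)
    (by intro a _; exact PySem.Dict.contains_empty a) (by simpa using hnd)
  simp only [hfresh]
  rw [PySem.Dict.items_eq_map_keys d hnd [], List.map_map]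
  rfl

-- ===== VERDICT (by name: the statement is the Claim_ definition above) =====
-- (theorem above serves as the verdict)
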